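-- pv_equiv track=rewrite | github.com/yavuzkakin/Projet-TIPE---Dijkstra | transfo13.py | cout_final
-- ===== SOURCE A (Python) =====
-- def cout_final(plan_final,plan_de_vol):
--     """permet de calculer le cout final"""
--     resu=0
--     compteur=0
--     for x in plan_final:
--         for y in plan_de_vol:
--             if x==y[-1]:
--                 resu+= abs(y[0]-compteur-1)*y[1]
--                 compteur+=1
--     return resu
-- ===== SOURCE B (Python) =====
-- def cout_final(plan_final, plan_de_vol):
--     """permet de calculer le cout final"""
--     index = {}
--     for y in plan_de_vol:
--         if y:
--             index[y[-1]] = index.get(y[-1], []) + [y]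
--     matches = [y for x in plan_final for y in index.get(x, [])]
--     return sum(abs(y[0] - k - 1) * y[1] for k, y in enumerate(matches))
-- ===== Notes on version B (the rewrite author's own statement) =====
-- stated objective: alternative
-- what changed: B builds a hash index from last element to its matching entries once so the inner scan over plan_de_vol disappears, then gathers matches by dictionary lookup and sums abs(y[0]-k-1)*y[1] in one enumerate pass, replacing A's nested scans with resu/compteur accumulators; cost is similar because the matched multiset itself can be quadratic.
import Mathlib
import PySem

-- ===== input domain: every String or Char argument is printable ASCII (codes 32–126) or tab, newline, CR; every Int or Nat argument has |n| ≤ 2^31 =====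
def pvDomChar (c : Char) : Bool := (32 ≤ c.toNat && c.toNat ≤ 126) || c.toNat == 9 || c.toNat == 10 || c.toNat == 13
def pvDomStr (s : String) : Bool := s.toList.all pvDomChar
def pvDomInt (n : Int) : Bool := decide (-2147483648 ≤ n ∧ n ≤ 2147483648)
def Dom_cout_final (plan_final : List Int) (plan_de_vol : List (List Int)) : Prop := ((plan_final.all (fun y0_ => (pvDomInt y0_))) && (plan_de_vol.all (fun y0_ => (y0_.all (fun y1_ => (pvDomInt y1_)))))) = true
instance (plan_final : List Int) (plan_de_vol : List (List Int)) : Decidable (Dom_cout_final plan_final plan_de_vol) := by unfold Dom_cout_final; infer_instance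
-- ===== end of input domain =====

-- B replaces A's inner scan over plan_de_vol by a hash index from last element to its
-- entries, built once, then sums the costs in a single enumerate pass over the matches
-- (an alternative decomposition; measured cost is similar).

-- ===== PORT A =====
def cout_final (plan_final : List Int) (plan_de_vol : List (List Int)) : Int :=
  (plan_final.foldl
    (fun (st : Int × Int) x =>
      plan_de_vol.foldl
        (fun (st : Int × Int) y =>
          if x = (PySem.List.pyGet? y (-1)).getD 0 then
            (st.1 + |(PySem.List.pyGet? y 0).getD 0 - st.2 - 1| * (PySem.List.pyGet? y 1).getD 0,
             st.2 + 1)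
          else st)
        st)
    (0, 0)).1

-- ===== PORT B =====
def cout_final_alt (plan_final : List Int) (plan_de_vol : List (List Int)) : Int :=
  -- index[y[-1]] = index.get(y[-1], []) + [y]  (empty y skipped)
  let index : PySem.Dict Int (List (List Int)) :=
    plan_de_vol.foldl
      (fun d y =>
        if y.isEmpty then d
        else d.modify ((PySem.List.pyGet? y (-1)).getD 0) [] (· ++ [y]))
      PySem.Dict.empty
  let ms := plan_final.flatMap (fun x => index.getD x [])
  ((PySem.List.enumerate ms 0).map
    (fun p => |(PySem.List.pyGet? p.2 0).getD 0 - p.1 - 1| * (PySem.List.pyGet? p.2 1).getD 0)).sum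

-- ===== PRECONDITION & SPEC =====
-- Pre_ excludes exactly the inputs on which the Python A raises IndexError: when the outer loop
-- runs at all (plan_final nonempty), every inner list must be nonempty (y[-1]), and every inner
-- list whose last element matches some x must have length ≥ 2 (y[1]).
def Pre_cout_final (plan_final : List Int) (plan_de_vol : List (List Int)) : Prop :=
  plan_final ≠ [] →
    ∀ y ∈ plan_de_vol, y ≠ [] ∧ (∀ l, y.getLast? = some l → l ∈ plan_final → 2 ≤ y.length)
instance (plan_final : List Int) (plan_de_vol : List (List Int)) : Decidable (Pre_cout_final plan_final plan_de_vol) := by unfold Pre_cout_final; infer_instance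
def pvWitness_cout_final : List Int × List (List Int) := ([3, 5], [[1, 2, 3], [2, 4, 5], [1, 7]])

def Spec_cout_final (plan_final : List Int) (plan_de_vol : List (List Int)) (out : Int) : Prop := out = cout_final_alt plan_final plan_de_vol
instance (plan_final : List Int) (plan_de_vol : List (List Int)) (out : Int) : Decidable (Spec_cout_final plan_final plan_de_vol out) := by unfold Spec_cout_final; infer_instance

-- ===== CLAIM (what is proved, stated in full; the proofs are below) =====
def Claim_equal_cout_final : Prop := ∀ (plan_final : List Int) (plan_de_vol : List (List Int)), Dom_cout_final plan_final plan_de_vol → Pre_cout_final plan_final plan_de_vol → Spec_cout_final plan_final plan_de_vol (cout_final plan_final plan_de_vol)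

-- ===== LEMMAS AND PROOFS =====

-- cost of one matched entry at counter value c
def pvCost (y : List Int) (c : Int) : Int :=
  |(PySem.List.pyGet? y 0).getD 0 - c - 1| * (PySem.List.pyGet? y 1).getD 0

-- one step of A's accumulator on a matched entry
def pvStep (st : Int × Int) (y : List Int) : Int × Int := (st.1 + pvCost y st.2, st.2 + 1)

theorem inner_foldl_eq (x : Int) (pdv : List (List Int)) (st : Int × Int) :
    pdv.foldl
      (fun (st : Int × Int) y =>
        if x = (PySem.List.pyGet? y (-1)).getD 0 then
          (st.1 + |(PySem.List.pyGet? y 0).getD 0 - st.2 - 1| * (PySem.List.pyGet? y 1).getD 0,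
           st.2 + 1)
        else st)
      st
    = (pdv.filter (fun y => x == (PySem.List.pyGet? y (-1)).getD 0)).foldl pvStep st := by
  induction pdv generalizing st with
  | nil => rfl
  | cons y t ih =>
    by_cases h : x = (PySem.List.pyGet? y (-1)).getD 0
    · rw [List.foldl_cons, if_pos h, List.filter_cons_of_pos (by simpa using h),
        List.foldl_cons, ih]
      rfl
    · rw [List.foldl_cons, if_neg h, List.filter_cons_of_neg (by simpa using h), ih]

theorem outer_foldl_eq (pf : List Int) (pdv : List (List Int)) (st : Int × Int) :
    pf.foldl
      (fun (st : Int × Int) x =>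
        pdv.foldl
          (fun (st : Int × Int) y =>
            if x = (PySem.List.pyGet? y (-1)).getD 0 then
              (st.1 + |(PySem.List.pyGet? y 0).getD 0 - st.2 - 1| * (PySem.List.pyGet? y 1).getD 0,
               st.2 + 1)
            else st)
          st)
      st
    = (pf.flatMap (fun x => pdv.filter (fun y => x == (PySem.List.pyGet? y (-1)).getD 0))).foldl pvStep st := by
  induction pf generalizing st with
  | nil => rfl
  | cons x t ih =>
    rw [List.foldl_cons, List.flatMap_cons, List.foldl_append, inner_foldl_eq, ih]

theorem foldl_pvStep_fst (ms : List (List Int)) (r c : Int) :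
    (ms.foldl pvStep (r, c)).1
    = r + ((PySem.List.enumerate ms c).map (fun p => pvCost p.2 p.1)).sum := by
  induction ms generalizing r c with
  | nil => simp [PySem.List.enumerate_nil]
  | cons y t ih =>
    simp only [List.foldl, pvStep, PySem.List.enumerate_cons, List.map_cons, List.sum_cons, ih]
    ring

-- the index built by B's loop groups the nonempty entries by their last element, in order
theorem index_getD (pdv : List (List Int)) (d : PySem.Dict Int (List (List Int))) (x : Int) :
    (pdv.foldl
      (fun d y =>
        if y.isEmpty then d
        else d.modify ((PySem.List.pyGet? y (-1)).getD 0) [] (· ++ [y]))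
      d).getD x []
    = d.getD x []
      ++ pdv.filter (fun y => !y.isEmpty && ((PySem.List.pyGet? y (-1)).getD 0 == x)) := by
  induction pdv generalizing d with
  | nil => simp
  | cons y t ih =>
    by_cases he : y.isEmpty
    · rw [List.foldl_cons, if_pos he, ih, List.filter_cons_of_neg (by simp [he])]
    · rw [List.foldl_cons, if_neg he, ih]
      by_cases hk : (PySem.List.pyGet? y (-1)).getD 0 = x
      · rw [List.filter_cons_of_pos (by simp [he, hk]),
          hk, PySem.Dict.getD_modify_self]
        simp
      · rw [List.filter_cons_of_neg (by simp [hk]),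
          PySem.Dict.getD_modify, if_neg (fun h => hk h.symm)]

-- under Pre_, A's match list equals B's index-gathered match list
theorem matches_eq (pf : List Int) (pdv : List (List Int))
    (hpre : Pre_cout_final pf pdv) :
    pf.flatMap (fun x => pdv.filter (fun y => x == (PySem.List.pyGet? y (-1)).getD 0))
    = pf.flatMap (fun x =>
        (pdv.foldl
          (fun d y =>
            if y.isEmpty then d
            else d.modify ((PySem.List.pyGet? y (-1)).getD 0) [] (· ++ [y]))
          PySem.Dict.empty).getD x []) := by
  rcases eq_or_ne pf [] with hpf | hpf
  · simp [hpf]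
  · have hfun : ∀ x : Int,
        pdv.filter (fun y => x == (PySem.List.pyGet? y (-1)).getD 0)
        = (pdv.foldl
            (fun d y =>
              if y.isEmpty then d
              else d.modify ((PySem.List.pyGet? y (-1)).getD 0) [] (· ++ [y]))
            PySem.Dict.empty).getD x [] := by
      intro x
      rw [index_getD, PySem.Dict.getD_empty, List.nil_append]
      apply List.filter_congr
      intro y hy
      obtain ⟨hne, -⟩ := hpre hpf y hy
      simp [hne, BEq.comm]
    exact List.flatMap_congr (fun x _ => hfun x)

-- ===== VERDICT (by name: the statement is the Claim_ definition above) =====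
theorem cout_final_spec : Claim_equal_cout_final := by
  intro pf pdv _ hpre
  unfold Spec_cout_final cout_final cout_final_alt
  rw [outer_foldl_eq, foldl_pvStep_fst, matches_eq pf pdv hpre]
  simp [pvCost]
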